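-- pv_equiv track=rewrite | github.com/Chinchill-AI/chat-sdk-python | src/chat_sdk/shared/markdown_parser.py | _parse_inline_plain
-- ===== SOURCE A (Python) =====
-- from typing import Any
--
-- Content = dict[str, Any]
--
-- def make_text(value: str) -> Content:
--     """Create a text leaf node."""
--     return {"type": "text", "value": value}
--
-- def make_break() -> Content:
--     """Create a hard line break node."""
--     return {"type": "break"}
--
-- def _parse_inline_plain(text: str) -> list[Content]:
--     """Parse plain text that contains no inline formatting.
--
--     Handles hard line breaks (two trailing spaces + newline).
--     """
--     if "  \n" in text:
--         parts: list[Content] = []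
--         segments = text.split("  \n")
--         for i, seg in enumerate(segments):
--             if seg:
--                 parts.append(make_text(seg))
--             if i < len(segments) - 1:
--                 parts.append(make_break())
--         return parts if parts else [make_text(text)]
--     return [make_text(text)]
-- ===== SOURCE B (Python) =====
-- from typing import Any
--
-- Content = dict[str, Any]
--
-- def make_text(value: str) -> Content:
--     """Create a text leaf node."""
--     return {"type": "text", "value": value}
--
-- def make_break() -> Content:
--     """Create a hard line break node."""
--     return {"type": "break"}
--
-- def _parse_inline_plain(text: str) -> list[Content]:
--     """Incremental scan: peel off one hard-break delimiter at a time."""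
--     parts: list[Content] = []
--     rest = text
--     found = False
--     while True:
--         idx = rest.find("  \n")
--         if idx == -1:
--             break
--         found = True
--         if idx:
--             parts.append(make_text(rest[:idx]))
--         parts.append(make_break())
--         rest = rest[idx + 3:]
--     if not found:
--         return [make_text(text)]
--     if rest:
--         parts.append(make_text(rest))
--     return parts
-- ===== Notes on version B (the rewrite author's own statement) =====
-- stated objective: alternative
-- what changed: Replaces the substring-test + split-then-enumerate pass (with its index-vs-length comparison to place breaks) by a single incremental scan that repeatedly finds the next hard-break delimiter and peels the text off one segment at a time.
import Mathlib
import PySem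

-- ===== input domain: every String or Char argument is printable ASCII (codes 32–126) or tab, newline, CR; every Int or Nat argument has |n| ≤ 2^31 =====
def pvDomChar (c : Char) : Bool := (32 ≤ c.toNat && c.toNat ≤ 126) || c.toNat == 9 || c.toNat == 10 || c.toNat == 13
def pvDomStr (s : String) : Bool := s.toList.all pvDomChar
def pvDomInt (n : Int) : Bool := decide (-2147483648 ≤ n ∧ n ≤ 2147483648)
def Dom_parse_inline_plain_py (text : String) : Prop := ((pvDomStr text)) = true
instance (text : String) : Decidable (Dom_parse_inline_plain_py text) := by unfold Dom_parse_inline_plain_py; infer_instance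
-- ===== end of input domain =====

-- B replaces A's substring-test + split-then-enumerate pass by an incremental scan that peels
-- off one '  \n' delimiter at a time (objective: alternative decomposition, same cost).

-- ===== PORT A =====
-- module helpers make_text / make_break (dict -> association list)
def pvMakeText (v : String) : List (String × String) := [("type", "text"), ("value", v)]
def pvMakeBreak : List (String × String) := [("type", "break")]

def parse_inline_plain_py (text : String) : List (List (String × String)) :=
  if PySem.Str.isIn "  \n" text = true then
    let segments := PySem.Chars.splitOn text.toList "  \n".toList
    let parts := (PySem.List.enumerate segments).foldl
      (fun acc p =>
        let acc := if p.2 ≠ [] then acc ++ [pvMakeText (String.ofList p.2)] else acc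
        if p.1 < (segments.length : Int) - 1 then acc ++ [pvMakeBreak] else acc) []
    if parts ≠ [] then parts else [pvMakeText text]
  else [pvMakeText text]

-- ===== PORT B =====
-- the 'while True' scan of Source B: returns (parts, rest, found) at the break
def pvAltLoop (rest : List Char) (parts : List (List (String × String))) (found : Bool) :
    List (List (String × String)) × List Char × Bool :=
  let idx := PySem.Chars.find rest "  \n".toList
  if h : idx = -1 then (parts, rest, found)
  else
    let parts := if idx ≠ 0 then parts ++ [pvMakeText (String.ofList (PySem.List.slice rest none (some idx)))] else parts
    pvAltLoop (PySem.List.slice rest (some (idx + 3)) none) (parts ++ [pvMakeBreak]) true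
termination_by rest.length
decreasing_by
  have h0 : (0 : Int) ≤ PySem.Chars.find rest "  \n".toList := by
    have := PySem.Chars.neg_one_le_find rest "  \n".toList; omega
  have hne : rest ≠ [] := by
    intro hnil; subst hnil; exact h rfl
  rw [PySem.List.slice_from rest (by omega)]
  simp only [List.length_drop]
  have : 0 < rest.length := List.length_pos_iff.mpr hne
  omega

def parse_inline_plain_py_alt (text : String) : List (List (String × String)) :=
  let r := pvAltLoop text.toList [] false
  if r.2.2 = false then [pvMakeText text]
  else if r.2.1 ≠ [] then r.1 ++ [pvMakeText (String.ofList r.2.1)] else r.1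

-- ===== PRECONDITION & SPEC =====
def Spec_parse_inline_plain_py (text : String) (out : List (List (String × String))) : Prop := out = parse_inline_plain_py_alt text
instance (text : String) (out : List (List (String × String))) : Decidable (Spec_parse_inline_plain_py text out) := by unfold Spec_parse_inline_plain_py; infer_instance

-- ===== CLAIM (what is proved, stated in full; the proofs are below) =====
def Claim_equal_parse_inline_plain_py : Prop := ∀ (text : String), Dom_parse_inline_plain_py text → Spec_parse_inline_plain_py text (parse_inline_plain_py text)

-- ===== LEMMAS AND PROOFS =====

-- the delimiter, as a char list
def pvSep : List Char := "  \n".toList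

lemma pvSep_eq : "  \n".toList = pvSep := rfl

lemma pvSep_len : pvSep.length = 3 := by decide

-- `find` on the empty string (nonempty needle) is -1
lemma pv_find_nil : PySem.Chars.find [] pvSep = -1 := by decide

-- find.go at offset k relative to find at 0
lemma pv_find_go_eq (l : List Char) (k : Nat) :
    PySem.Chars.find.go pvSep l k =
      if PySem.Chars.find l pvSep = -1 then -1 else (k : Int) + PySem.Chars.find l pvSep := by
  induction l generalizing k with
  | nil => simp [PySem.Chars.find, PySem.Chars.find.go.eq_1, pvSep]
  | cons c t ih =>
    rw [PySem.Chars.find.go.eq_2]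
    by_cases hp : pvSep.isPrefixOf (c :: t) = true
    · simp [hp, PySem.Chars.find, PySem.Chars.find.go.eq_2]
    · simp only [hp]
      rw [ih (k+1)]
      have hf : PySem.Chars.find (c :: t) pvSep = PySem.Chars.find.go pvSep t 1 := by
        simp [PySem.Chars.find, PySem.Chars.find.go.eq_2, hp]
      rw [hf, ih 1]
      have hb := PySem.Chars.neg_one_le_find t pvSep
      by_cases h2 : PySem.Chars.find t pvSep = -1 <;>
        simp [h2] <;> push_cast <;> omega

-- structural recursion for find on a cons
lemma pv_find_cons (c : Char) (t : List Char) :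
    PySem.Chars.find (c :: t) pvSep =
      if pvSep.isPrefixOf (c :: t) then 0
      else if PySem.Chars.find t pvSep = -1 then -1 else PySem.Chars.find t pvSep + 1 := by
  by_cases hp : pvSep.isPrefixOf (c :: t) = true
  · simp [PySem.Chars.find, PySem.Chars.find.go.eq_2, hp]
  · simp only [PySem.Chars.find, PySem.Chars.find.go.eq_2, hp, if_false, Bool.false_eq_true]
    rw [pv_find_go_eq t 1]
    by_cases h2 : PySem.Chars.find t pvSep = -1 <;> simp [PySem.Chars.find, h2] <;> omega

-- reference splitter: recursion on the suffix via find (the shape both programs share)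
def pvRefSplit (l : List Char) : List (List Char) :=
  let j := PySem.Chars.find l pvSep
  if h : j = -1 then [l]
  else l.take j.toNat :: pvRefSplit (l.drop (j.toNat + 3))
termination_by l.length
decreasing_by
  have h0 : (0 : Int) ≤ PySem.Chars.find l pvSep := by
    have := PySem.Chars.neg_one_le_find l pvSep; omega
  have hne : l ≠ [] := by
    intro hnil; subst hnil; exact h pv_find_nil
  simp only [List.length_drop]
  have : 0 < l.length := List.length_pos_iff.mpr hne
  omega

lemma pvRefSplit_eq (l : List Char) :
    pvRefSplit l =
      if PySem.Chars.find l pvSep = -1 then [l]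
      else l.take (PySem.Chars.find l pvSep).toNat
        :: pvRefSplit (l.drop ((PySem.Chars.find l pvSep).toNat + 3)) := by
  rw [pvRefSplit]; split <;> rfl

lemma pvRefSplit_ne_nil (l : List Char) : pvRefSplit l ≠ [] := by
  rw [pvRefSplit_eq]
  split <;> simp

-- prepend to the head segment (what splitOn.go's `cur` accumulator does)
def pvConsHead (p : List Char) : List (List Char) → List (List Char)
  | [] => [p]
  | x :: t => (p ++ x) :: t

lemma pvConsHead_nil {T : List (List Char)} (h : T ≠ []) : pvConsHead [] T = T := by
  cases T with
  | nil => exact absurd rfl h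
  | cons x t => simp [pvConsHead]

-- splitOn.go computed by pvRefSplit
lemma pv_go_spec (fuel : Nat) : ∀ (l cur : List Char) (acc : List (List Char)),
    l.length < fuel →
    PySem.Chars.splitOn.go pvSep fuel l cur acc
      = acc.reverse ++ pvConsHead cur.reverse (pvRefSplit l) := by
  induction fuel with
  | zero => intro l cur acc h; omega
  | succ f ih =>
    intro l cur acc h
    cases l with
    | nil =>
      rw [PySem.Chars.splitOn.go.eq_def, pvRefSplit_eq]
      simp [pv_find_nil, pvConsHead]
    | cons c rest =>
      rw [PySem.Chars.splitOn.go.eq_def]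
      by_cases hp : pvSep.isPrefixOf (c :: rest) = true
      · simp only [hp, if_true]
        have hlen : (List.drop pvSep.length (c :: rest)).length < f := by
          simp only [List.length_drop, pvSep_len, List.length_cons]
          simp only [List.length_cons] at h; omega
        rw [ih _ _ _ hlen]
        have hfind : PySem.Chars.find (c :: rest) pvSep = 0 := by
          rw [pv_find_cons]; simp [hp]
        rw [pvRefSplit_eq (c :: rest), hfind, if_neg (by norm_num)]
        have hT := pvRefSplit_ne_nil (List.drop pvSep.length (c :: rest))
        rw [List.reverse_nil, pvConsHead_nil hT]
        simp only [pvSep_len] at *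
        simp [pvConsHead]
      · simp only [hp, if_false, Bool.false_eq_true]
        have hlen : rest.length < f := by simp only [List.length_cons] at h; omega
        rw [ih _ _ _ hlen]
        congr 1
        have hb := PySem.Chars.neg_one_le_find rest pvSep
        have hfc := pv_find_cons c rest
        rw [if_neg (by simp [hp])] at hfc
        by_cases h2 : PySem.Chars.find rest pvSep = -1
        · rw [if_pos h2] at hfc
          rw [pvRefSplit_eq (c :: rest), if_pos hfc, pvRefSplit_eq rest, if_pos h2]
          simp [pvConsHead]
        · rw [if_neg h2] at hfc
          rw [pvRefSplit_eq (c :: rest), hfc, if_neg (by omega),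
              pvRefSplit_eq rest, if_neg h2]
          have hj : (PySem.Chars.find rest pvSep + 1).toNat
              = (PySem.Chars.find rest pvSep).toNat + 1 := by omega
          rw [hj]
          simp [pvConsHead, List.take_succ_cons]

lemma pv_splitOn_eq (s : List Char) : PySem.Chars.splitOn s pvSep = pvRefSplit s := by
  unfold PySem.Chars.splitOn
  rw [pv_go_spec (s.length + 1) s [] [] (by omega)]
  simp [pvConsHead_nil (pvRefSplit_ne_nil s)]

-- the output both programs build from the segment list
def pvJoin : List (List Char) → List (List (String × String))
  | [] => []
  | [x] => if x ≠ [] then [pvMakeText (String.ofList x)] else []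
  | x :: y :: t =>
      (if x ≠ [] then [pvMakeText (String.ofList x)] else []) ++ [pvMakeBreak] ++ pvJoin (y :: t)

-- A's enumerate-fold over the segments is pvJoin
lemma pv_foldA (segs : List (List Char)) : ∀ (k : Int) (acc : List (List (String × String))) (n : Int),
    n = k + segs.length →
    (PySem.List.enumerate segs k).foldl
      (fun acc p =>
        let acc := if p.2 ≠ [] then acc ++ [pvMakeText (String.ofList p.2)] else acc
        if p.1 < n - 1 then acc ++ [pvMakeBreak] else acc) acc
      = acc ++ pvJoin segs := by
  induction segs with
  | nil => intro k acc n hn; simp [PySem.List.enumerate_nil, pvJoin]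
  | cons x t ih =>
    intro k acc n hn
    simp only [List.length_cons] at hn
    rw [PySem.List.enumerate_cons, List.foldl_cons]
    cases t with
    | nil =>
      simp only [List.length_nil] at hn
      simp only [if_neg (show ¬ (k < n - 1) by omega)]
      by_cases hx : x = [] <;> simp [hx, PySem.List.enumerate_nil, pvJoin]
    | cons y t' =>
      simp only [List.length_cons] at hn
      simp only [if_pos (show k < n - 1 by push_cast; omega)]
      rw [ih (k + 1) _ n (by simp only [List.length_cons]; push_cast at hn; omega)]
      by_cases hx : x = [] <;> simp [hx, pvJoin]

-- B's scan loop: one unfolding step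
lemma pvAltLoop_eq (l : List Char) (parts : List (List (String × String))) (found : Bool) :
    pvAltLoop l parts found =
      if PySem.Chars.find l pvSep = -1 then (parts, l, found)
      else pvAltLoop (PySem.List.slice l (some (PySem.Chars.find l pvSep + 3)) none)
        ((if PySem.Chars.find l pvSep ≠ 0
          then parts ++ [pvMakeText (String.ofList (PySem.List.slice l none (some (PySem.Chars.find l pvSep))))]
          else parts) ++ [pvMakeBreak]) true := by
  by_cases h2 : PySem.Chars.find l pvSep = -1
  · rw [pvAltLoop]; simp only [pvSep_eq]; rw [dif_pos h2, if_pos h2]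
  · rw [pvAltLoop]; simp only [pvSep_eq]; rw [dif_neg h2, if_neg h2]

-- B's scan loop computed by pvJoin ∘ pvRefSplit
lemma pv_altLoop_aux (N : Nat) : ∀ (l : List Char), l.length ≤ N →
    ∀ (parts : List (List (String × String))) (found : Bool),
    (pvAltLoop l parts found).1
        ++ (if (pvAltLoop l parts found).2.1 ≠ []
            then [pvMakeText (String.ofList (pvAltLoop l parts found).2.1)] else [])
      = parts ++ pvJoin (pvRefSplit l)
    ∧ (pvAltLoop l parts found).2.2 = (found || !decide (PySem.Chars.find l pvSep = -1)) := by
  induction N with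
  | zero =>
    intro l hl parts found
    have hnil : l = [] := List.eq_nil_of_length_eq_zero (by omega)
    subst hnil
    rw [pvAltLoop_eq, if_pos pv_find_nil, pvRefSplit_eq, if_pos pv_find_nil]
    simp [pvJoin, pv_find_nil]
  | succ N ih =>
    intro l hl parts found
    rw [pvAltLoop_eq]
    by_cases h2 : PySem.Chars.find l pvSep = -1
    · rw [if_pos h2, pvRefSplit_eq, if_pos h2]
      simp [pvJoin, h2]
    · rw [if_neg h2]
      have h0 : (0 : Int) ≤ PySem.Chars.find l pvSep := by
        have := PySem.Chars.neg_one_le_find l pvSep; omega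
      have hne : l ≠ [] := by intro hnil; subst hnil; exact h2 pv_find_nil
      have ht3 : (PySem.Chars.find l pvSep + 3).toNat = (PySem.Chars.find l pvSep).toNat + 3 := by
        omega
      rw [PySem.List.slice_from l (by omega), PySem.List.slice_to l h0, ht3]
      have hlen : (List.drop ((PySem.Chars.find l pvSep).toNat + 3) l).length ≤ N := by
        simp only [List.length_drop]
        have : 0 < l.length := List.length_pos_iff.mpr hne
        omega
      obtain ⟨ih1, ih2⟩ := ih _ hlen
        ((if PySem.Chars.find l pvSep ≠ 0
          then parts ++ [pvMakeText (String.ofList (List.take (PySem.Chars.find l pvSep).toNat l))]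
          else parts) ++ [pvMakeBreak]) true
      refine ⟨?_, by rw [ih2]; simp [h2]⟩
      rw [ih1, pvRefSplit_eq l, if_neg h2]
      obtain ⟨y, t, hT⟩ : ∃ y t, pvRefSplit (List.drop ((PySem.Chars.find l pvSep).toNat + 3) l) = y :: t := by
        cases hc : pvRefSplit (List.drop ((PySem.Chars.find l pvSep).toNat + 3) l) with
        | nil => exact absurd hc (pvRefSplit_ne_nil _)
        | cons y t => exact ⟨y, t, rfl⟩
      rw [hT]
      by_cases hz : PySem.Chars.find l pvSep = 0
      · simp [hz, pvJoin]
      · have htk : List.take (PySem.Chars.find l pvSep).toNat l ≠ [] := by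
          have : (PySem.Chars.find l pvSep).toNat ≠ 0 := by omega
          simp [List.take_eq_nil_iff, this, hne]
        simp [hz, pvJoin, htk]

lemma pvJoin_two_ne_nil (x y : List Char) (t : List (List Char)) : pvJoin (x :: y :: t) ≠ [] := by
  simp [pvJoin]

-- ===== VERDICT (by name: the statement is the Claim_ definition above) =====
theorem parse_inline_plain_py_spec : Claim_equal_parse_inline_plain_py := by
  intro text _
  unfold Spec_parse_inline_plain_py parse_inline_plain_py parse_inline_plain_py_alt
  by_cases h : PySem.Str.isIn "  \n" text = true
  · -- the text contains a hard break
    have hinf : "  \n".toList <:+: text.toList := (PySem.Str.isIn_iff_infix _ _).mp h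
    have hfind : PySem.Chars.find text.toList pvSep ≠ -1 := fun hc =>
      ((PySem.Chars.find_eq_neg_one_iff _ _).mp hc) hinf
    rw [if_pos h]
    obtain ⟨ih1, ih2⟩ := pv_altLoop_aux (text.toList.length) text.toList le_rfl [] false
    have hB2 : (pvAltLoop text.toList [] false).2.2 = true := by
      rw [ih2]; simp [hfind]
    simp only [pvSep_eq, pv_splitOn_eq]
    rw [pv_foldA (pvRefSplit text.toList) 0 [] _ (by simp)]
    have hparts : pvJoin (pvRefSplit text.toList) ≠ [] := by
      rw [pvRefSplit_eq, if_neg hfind]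
      obtain ⟨y, t, hT⟩ : ∃ y t,
          pvRefSplit (List.drop ((PySem.Chars.find text.toList pvSep).toNat + 3) text.toList) = y :: t := by
        cases hc : pvRefSplit (List.drop ((PySem.Chars.find text.toList pvSep).toNat + 3) text.toList) with
        | nil => exact absurd hc (pvRefSplit_ne_nil _)
        | cons y t => exact ⟨y, t, rfl⟩
      rw [hT]
      exact pvJoin_two_ne_nil _ y t
    rw [if_pos (by simpa using hparts), if_neg (by simp [hB2])]
    rw [List.nil_append] at ih1
    by_cases hr : (pvAltLoop text.toList [] false).2.1 = []
    · rw [if_neg (by simpa using hr)]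
      rw [if_neg (by simp [hr]), List.append_nil] at ih1
      exact ih1.symm
    · rw [if_pos (by simpa using hr)]
      rw [if_pos (by simpa using hr)] at ih1
      exact ih1.symm
  · -- no hard break: both fall back to a single text node
    have hninf : ¬ "  \n".toList <:+: text.toList := fun hc =>
      h ((PySem.Str.isIn_iff_infix _ _).mpr hc)
    have hfind : PySem.Chars.find text.toList pvSep = -1 :=
      (PySem.Chars.find_eq_neg_one_iff _ _).mpr hninf
    rw [if_neg h]
    rw [pvAltLoop_eq, if_pos hfind]
    rfl
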